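-- pv_equiv track=rewrite | github.com/raydatray/reetcode | py/oa/citadel.py | find_valid_sizes
-- ===== SOURCE A (Python) =====
-- from typing import List
--
-- def find_valid_sizes(memory_blocks: List[int]) -> List[int]:
--     memory_blocks.sort()
--
--     curr = 0
--     result = []
--
--     for block in memory_blocks:
--         if block > curr:
--             break
--
--         result.append(curr)
--         curr += 1
--
--     result.append(curr)
--
--     return result
-- ===== SOURCE B (Python) =====
-- def find_valid_sizes(memory_blocks):
--     n = len(memory_blocks)
--     cnt = [0] * (n + 1)
--     for b in memory_blocks:
--         cnt[min(max(b, 0), n)] += 1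
--     running = 0
--     for i in range(n):
--         running += cnt[i]
--         if running <= i:
--             return list(range(i + 1))
--     return list(range(n + 1))
-- ===== Notes on version B (the rewrite author's own statement) =====
-- stated objective: alternative
-- what changed: B replaces sorting the blocks and walking the sorted prefix with a clamped counting array of size n+1 and a single prefix-count scan that finds the first i with count(blocks <= i) <= i; B also does not mutate its argument where A sorts it in place.
import Mathlib
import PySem

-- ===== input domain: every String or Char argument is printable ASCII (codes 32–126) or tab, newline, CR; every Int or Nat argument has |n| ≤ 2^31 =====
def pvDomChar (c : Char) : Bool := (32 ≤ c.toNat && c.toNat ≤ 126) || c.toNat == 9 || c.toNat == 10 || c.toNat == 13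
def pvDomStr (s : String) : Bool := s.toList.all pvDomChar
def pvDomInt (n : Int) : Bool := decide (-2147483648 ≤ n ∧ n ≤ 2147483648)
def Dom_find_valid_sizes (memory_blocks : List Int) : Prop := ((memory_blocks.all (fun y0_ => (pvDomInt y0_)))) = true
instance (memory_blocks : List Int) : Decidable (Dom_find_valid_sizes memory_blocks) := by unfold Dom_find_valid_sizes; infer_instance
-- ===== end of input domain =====

-- B replaces sort-then-scan with a clamped counting array and one prefix-count pass (asymptotically linear, though not measurably faster in CPython); A sorts its argument in place, B does not mutate it -- return values proved equal.


-- ===== PORT A =====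
def fvsLoopA : List Int → Int → List Int → List Int
  | [], curr, result => result ++ [curr]
  | block :: rest, curr, result =>
      if block > curr then result ++ [curr]
      else fvsLoopA rest (curr + 1) (result ++ [curr])

def find_valid_sizes (memory_blocks : List Int) : List Int :=
  fvsLoopA (PySem.List.sorted memory_blocks (fun x => x) false) 0 []

-- ===== PORT B =====
def fvsClamp (n : Nat) (b : Int) : Nat := (min (max b 0) (n : Int)).toNat

def fvsCnt (memory_blocks : List Int) (n : Nat) : List Int :=
  memory_blocks.foldl
    (fun cnt b => cnt.set (fvsClamp n b) (cnt.getD (fvsClamp n b) 0 + 1))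
    (List.replicate (n + 1) 0)

def fvsScan (cnt : List Int) (n i : Nat) (running : Int) : List Int :=
  if i < n then
    let r := running + cnt.getD i 0
    if r ≤ (i : Int) then PySem.List.pyRange 0 ((i : Int) + 1) 1
    else fvsScan cnt n (i + 1) r
  else PySem.List.pyRange 0 ((n : Int) + 1) 1
termination_by n - i

def find_valid_sizes_alt (memory_blocks : List Int) : List Int :=
  fvsScan (fvsCnt memory_blocks memory_blocks.length) memory_blocks.length 0 0

-- ===== PRECONDITION & SPEC =====
def Spec_find_valid_sizes (memory_blocks : List Int) (out : List Int) : Prop := out = find_valid_sizes_alt memory_blocks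
instance (memory_blocks : List Int) (out : List Int) : Decidable (Spec_find_valid_sizes memory_blocks out) := by unfold Spec_find_valid_sizes; infer_instance

-- ===== CLAIM (what is proved, stated in full; the proofs are below) =====
def Claim_equal_find_valid_sizes : Prop := ∀ (memory_blocks : List Int), Dom_find_valid_sizes memory_blocks → Spec_find_valid_sizes memory_blocks (find_valid_sizes memory_blocks)

-- ===== LEMMAS AND PROOFS =====

lemma countP_split (f : Int → Nat) (xs : List Int) (i : Nat) :
    xs.countP (fun b => decide (f b < i + 1)) =
      xs.countP (fun b => decide (f b < i)) + xs.countP (fun b => decide (f b = i)) := by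
  induction xs with
  | nil => simp
  | cons x t ih =>
    simp only [List.countP_cons, ih]
    by_cases h0 : f x < i + 1 <;> by_cases h1 : f x < i <;> by_cases h2 : f x = i <;>
      simp [h0, h1, h2] <;> omega

lemma fvsClamp_le (n : Nat) (b : Int) : fvsClamp n b ≤ n := by
  unfold fvsClamp; omega

lemma fvsClamp_lt_succ_iff (n i : Nat) (b : Int) (hi : i < n) :
    (fvsClamp n b < i + 1) ↔ (b ≤ (i : Int)) := by
  unfold fvsClamp; omega

lemma fvsCnt_aux (xs : List Int) (n j : Nat) (cnt : List Int)
    (hlen : cnt.length = n + 1) :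
    ((xs.foldl (fun cnt b => cnt.set (fvsClamp n b) (cnt.getD (fvsClamp n b) 0 + 1)) cnt).getD j 0)
      = cnt.getD j 0 + (xs.countP (fun b => decide (fvsClamp n b = j)) : Int) := by
  induction xs generalizing cnt with
  | nil => simp
  | cons x t ih =>
    simp only [List.foldl_cons, List.countP_cons]
    rw [ih _ (by simp [hlen])]
    by_cases h : fvsClamp n x = j
    · subst h
      have hlt : fvsClamp n x < cnt.length := by
        have := fvsClamp_le n x; omega
      simp [List.getD_eq_getElem?_getD, hlt]
      ring
    · simp [List.getD_eq_getElem?_getD, h]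

lemma fvsCnt_getD (xs : List Int) (n j : Nat) (hj : j ≤ n) :
    (fvsCnt xs n).getD j 0 = (xs.countP (fun b => decide (fvsClamp n b = j)) : Int) := by
  unfold fvsCnt
  rw [fvsCnt_aux xs n j _ (by simp)]
  simp [List.getD_eq_getElem?_getD, Nat.lt_succ_of_le hj]

lemma sorted_count_iff (s : List Int) (hs : s.Pairwise (· ≤ ·)) (i : Nat) (hi : i < s.length) :
    ((i : Int) < s[i] ↔ s.countP (fun b => decide (b ≤ (i : Int))) ≤ i) := by
  have hpw := List.pairwise_iff_getElem.mp hs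
  constructor
  · intro h
    have hsplit : s.countP (fun b => decide (b ≤ (i : Int)))
        = (s.take i).countP (fun b => decide (b ≤ (i : Int)))
          + (s.drop i).countP (fun b => decide (b ≤ (i : Int))) := by
      rw [← List.countP_append, List.take_append_drop]
    have hdrop : (s.drop i).countP (fun b => decide (b ≤ (i : Int))) = 0 := by
      rw [List.countP_eq_zero]
      intro a ha
      rw [List.mem_drop_iff_getElem] at ha
      obtain ⟨j, hm, rfl⟩ := ha
      have hle : s[i] ≤ s[i + j] := by
        rcases Nat.eq_zero_or_pos j with hj | hj
        · subst hj; simp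
        · exact hpw i (i + j) hi (by omega) (by omega)
      simp only [decide_eq_true_eq]
      omega
    have htake : (s.take i).countP (fun b => decide (b ≤ (i : Int))) ≤ i := by
      calc (s.take i).countP (fun b => decide (b ≤ (i : Int)))
          ≤ (s.take i).length := List.countP_le_length
        _ ≤ i := by simp
    omega
  · intro h
    by_contra hnot
    rw [Int.not_lt] at hnot
    have hall : ∀ a ∈ s.take (i + 1), (fun b => decide (b ≤ (i : Int))) a = true := by
      intro a ha
      rw [List.mem_take_iff_getElem] at ha
      obtain ⟨j, hm, rfl⟩ := ha
      have hj : j < i + 1 := lt_of_lt_of_le hm (min_le_left _ _)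
      have hle : s[j] ≤ s[i] := by
        rcases Nat.lt_or_ge j i with hj' | hj'
        · exact hpw j i (by omega) hi hj'
        · have hji : j = i := by omega
          subst hji; exact le_refl _
      simp only [decide_eq_true_eq]
      omega
    have h1 : (s.take (i + 1)).countP (fun b => decide (b ≤ (i : Int)))
        = (s.take (i + 1)).length := List.countP_eq_length.mpr hall
    have h2 : (s.take (i + 1)).length = i + 1 := by simp; omega
    have h3 : s.countP (fun b => decide (b ≤ (i : Int)))
        = (s.take (i + 1)).countP (fun b => decide (b ≤ (i : Int)))
          + (s.drop (i + 1)).countP (fun b => decide (b ≤ (i : Int))) := by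
      rw [← List.countP_append, List.take_append_drop]
    omega

lemma main_loop (xs : List Int) (i : Nat) (hi : i ≤ xs.length) (running : Int)
    (hrun : running = (xs.countP (fun b => decide (fvsClamp xs.length b < i)) : Int)) :
    fvsLoopA ((PySem.List.sorted xs (fun x => x) false).drop i) (i : Int)
        (PySem.List.pyRange 0 (i : Int) 1)
      = fvsScan (fvsCnt xs xs.length) xs.length i running := by
  obtain ⟨k, hk⟩ : ∃ k, k = xs.length - i := ⟨_, rfl⟩
  induction k generalizing i running with
  | zero =>
    have hin : i = xs.length := by omega
    subst hin
    rw [List.drop_eq_nil_of_le (by rw [PySem.List.length_sorted])]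
    show PySem.List.pyRange 0 (xs.length : Int) 1 ++ [(xs.length : Int)] = _
    rw [← PySem.List.pyRange_one_succ_right (by positivity), fvsScan]
    simp
  | succ k ih =>
    have hilt : i < xs.length := by omega
    have hslen : (PySem.List.sorted xs (fun x => x) false).length = xs.length :=
      PySem.List.length_sorted xs _ _
    have hidx : i < (PySem.List.sorted xs (fun x => x) false).length := by omega
    rw [List.drop_eq_getElem_cons hidx]
    have hcnt : xs.countP (fun b => decide (fvsClamp xs.length b < i + 1))
        = xs.countP (fun b => decide (b ≤ (i : Int))) :=
      List.countP_congr fun a _ => by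
        simp only [decide_eq_true_eq]
        exact fvsClamp_lt_succ_iff xs.length i a hilt
    have hr : running + (fvsCnt xs xs.length).getD i 0
        = (xs.countP (fun b => decide (b ≤ (i : Int))) : Int) := by
      rw [hrun, fvsCnt_getD xs xs.length i (le_of_lt hilt), ← Nat.cast_add,
        ← countP_split (fvsClamp xs.length) xs i, hcnt]
    have hperm : (PySem.List.sorted xs (fun x => x) false).countP
          (fun b => decide (b ≤ (i : Int)))
        = xs.countP (fun b => decide (b ≤ (i : Int))) :=
      (PySem.List.sorted_perm xs _ _).countP_eq _
    have hiff : ((i : Int) < (PySem.List.sorted xs (fun x => x) false)[i]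
        ↔ running + (fvsCnt xs xs.length).getD i 0 ≤ (i : Int)) := by
      rw [hr, ← hperm]
      have := sorted_count_iff (PySem.List.sorted xs (fun x => x) false)
        (PySem.List.sorted_pairwise xs (fun x => x)) i hidx
      constructor
      · intro hx; exact_mod_cast this.mp hx
      · intro hx; exact this.mpr (by exact_mod_cast hx)
    rw [fvsScan]
    simp only [if_pos hilt]
    by_cases hc : running + (fvsCnt xs xs.length).getD i 0 ≤ (i : Int)
    · rw [if_pos hc]
      show (if (PySem.List.sorted xs (fun x => x) false)[i] > (i : Int) then _ else _) = _
      rw [if_pos (hiff.mpr hc)]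
      rw [← PySem.List.pyRange_one_succ_right (by positivity)]
    · rw [if_neg hc]
      show (if (PySem.List.sorted xs (fun x => x) false)[i] > (i : Int) then _ else _) = _
      rw [if_neg (fun hx => hc (hiff.mp hx))]
      have hrun' : running + (fvsCnt xs xs.length).getD i 0
          = (xs.countP (fun b => decide (fvsClamp xs.length b < i + 1)) : Int) := by
        rw [hr, ← hcnt]
      have hrec := ih (i + 1) (by omega) (running + (fvsCnt xs xs.length).getD i 0)
        hrun' (by omega)
      rw [← PySem.List.pyRange_one_succ_right (by positivity)]
      push_cast at hrec ⊢
      exact hrec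

-- ===== VERDICT (by name: the statement is the Claim_ definition above) =====
theorem find_valid_sizes_spec : Claim_equal_find_valid_sizes := by
  intro memory_blocks _
  unfold Spec_find_valid_sizes find_valid_sizes find_valid_sizes_alt
  have h := main_loop memory_blocks 0 (Nat.zero_le _) 0 (by simp)
  simpa [PySem.List.pyRange] using h
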